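-- pv_equiv track=rewrite | github.com/noxtgm/epreuves-pratiques-nsi-2024 | sujets/24_NSI_06.py | depouille
-- ===== SOURCE A (Python) =====
-- def depouille(urne:list):
--     '''prend en paramètre une liste de suffrages et renvoie un
--     dictionnaire avec le nombre de voix pour chaque candidat'''
--     resultat = {}
--     for bulletin in urne:
--         if bulletin in resultat:
--             resultat[bulletin] = resultat[bulletin] + 1
--         else:
--             resultat[bulletin] = 1
--     return resultat
-- ===== SOURCE B (Python) =====
-- def depouille(urne: list):
--     '''prend en paramètre une liste de suffrages et renvoie un
--     dictionnaire avec le nombre de voix pour chaque candidat'''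
--     return {c: urne.count(c) for c in dict.fromkeys(urne)}
-- ===== Notes on version B (the rewrite author's own statement) =====
-- stated objective: alternative
-- what changed: Replaces A's single accumulating dict pass with building the ordered set of distinct candidates (dict.fromkeys) and counting each one with urne.count in a comprehension.
import Mathlib
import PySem

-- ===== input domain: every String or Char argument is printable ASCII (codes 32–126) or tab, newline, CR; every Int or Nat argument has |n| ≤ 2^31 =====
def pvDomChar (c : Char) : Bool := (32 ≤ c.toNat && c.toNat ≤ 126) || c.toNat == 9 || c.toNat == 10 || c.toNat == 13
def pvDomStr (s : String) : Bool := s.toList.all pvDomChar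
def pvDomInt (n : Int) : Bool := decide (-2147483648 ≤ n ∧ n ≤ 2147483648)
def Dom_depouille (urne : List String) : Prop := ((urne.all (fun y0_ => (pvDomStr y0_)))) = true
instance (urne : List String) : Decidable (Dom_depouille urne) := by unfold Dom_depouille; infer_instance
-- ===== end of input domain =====

-- B replaces A's single accumulating dict pass with an ordered-dedup of the candidates
-- followed by counting each distinct candidate with list.count (alternative decomposition).


-- ===== PORT A =====
def depouille (urne : List String) : List (String × Int) :=
  (urne.foldl
    (fun resultat bulletin =>
      if resultat.contains bulletin then
        resultat.insert bulletin (resultat.getD bulletin 0 + 1)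
      else
        resultat.insert bulletin 1)
    (PySem.Dict.empty : PySem.Dict String Int)).items

-- ===== PORT B =====
def depouille_alt (urne : List String) : List (String × Int) :=
  (PySem.List.dedup urne).map (fun c => (c, (urne.count c : Int)))

-- ===== PRECONDITION & SPEC =====
def Spec_depouille (urne : List String) (out : List (String × Int)) : Prop := out = depouille_alt urne
instance (urne : List String) (out : List (String × Int)) : Decidable (Spec_depouille urne out) := by unfold Spec_depouille; infer_instance

-- ===== CLAIM (what is proved, stated in full; the proofs are below) =====
def Claim_equal_depouille : Prop := ∀ (urne : List String), Dom_depouille urne → Spec_depouille urne (depouille urne)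

-- ===== LEMMAS AND PROOFS =====

-- A's loop step always equals "insert bulletin (getD bulletin 0 + 1)": in the else
-- branch the key is absent so getD returns the default 0.
theorem depouille_eq_counter_items (urne : List String) :
    depouille urne = (PySem.Dict.counter urne).items := by
  unfold depouille
  have hstep := PySem.List.foldl_congr_mem
    (l := urne) (init := (PySem.Dict.empty : PySem.Dict String Int))
    (f := fun (d : PySem.Dict String Int) x =>
      if d.contains x then d.insert x (d.getD x 0 + 1) else d.insert x 1)
    (g := fun (d : PySem.Dict String Int) x => d.insert x (d.getD x 0 + 1))
    (by
      intro d x _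
      by_cases h : d.contains x = true
      · simp [h]
      · simp only [Bool.not_eq_true] at h
        simp [h, PySem.Dict.getD_of_not_contains (h := h)])
  rw [hstep, PySem.Dict.foldl_insert_getD_add_one_eq_counter]

-- ===== VERDICT (by name: the statement is the Claim_ definition above) =====
theorem depouille_spec : Claim_equal_depouille := by
  intro urne _
  unfold Spec_depouille depouille_alt
  rw [depouille_eq_counter_items, PySem.Dict.items_counter]
  simp [PySem.List.dedup_eq_ofList]
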